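-- pv_equiv track=rewrite | github.com/NicholasLiem/kubescale | src/mltps/services/prediction_service.py | _group_consecutive_peaks
-- ===== SOURCE A (Python) =====
-- def _group_consecutive_peaks(peak_indices, max_gap=2):
--     """Group consecutive peaks together"""
--     if len(peak_indices) == 0:
--         return []
--
--     groups = []
--     current_group = [peak_indices[0]]
--
--     for i in range(1, len(peak_indices)):
--         if peak_indices[i] - peak_indices[i-1] <= max_gap:
--             current_group.append(peak_indices[i])
--         else:
--             groups.append(current_group)
--             current_group = [peak_indices[i]]
--
--     groups.append(current_group)
--     return groups
-- ===== SOURCE B (Python) =====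
-- def _group_consecutive_peaks(peak_indices, max_gap=2):
--     """Group consecutive peaks together"""
--     if not peak_indices:
--         return []
--     n = len(peak_indices)
--     # pass 1: split boundaries
--     bounds = [0] + [i for i in range(1, n)
--                     if peak_indices[i] - peak_indices[i - 1] > max_gap] + [n]
--     # pass 2: partition by slicing between consecutive boundaries
--     return [peak_indices[s:e] for s, e in zip(bounds, bounds[1:])]
-- ===== Notes on version B (the rewrite author's own statement) =====
-- stated objective: alternative
-- what changed: Replaces the single-pass accumulation of a growing current_group with a two-pass decomposition: first compute the list of split boundaries (0, every index whose gap exceeds max_gap, and n), then partition the input by slicing between consecutive boundaries.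
import Mathlib
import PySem

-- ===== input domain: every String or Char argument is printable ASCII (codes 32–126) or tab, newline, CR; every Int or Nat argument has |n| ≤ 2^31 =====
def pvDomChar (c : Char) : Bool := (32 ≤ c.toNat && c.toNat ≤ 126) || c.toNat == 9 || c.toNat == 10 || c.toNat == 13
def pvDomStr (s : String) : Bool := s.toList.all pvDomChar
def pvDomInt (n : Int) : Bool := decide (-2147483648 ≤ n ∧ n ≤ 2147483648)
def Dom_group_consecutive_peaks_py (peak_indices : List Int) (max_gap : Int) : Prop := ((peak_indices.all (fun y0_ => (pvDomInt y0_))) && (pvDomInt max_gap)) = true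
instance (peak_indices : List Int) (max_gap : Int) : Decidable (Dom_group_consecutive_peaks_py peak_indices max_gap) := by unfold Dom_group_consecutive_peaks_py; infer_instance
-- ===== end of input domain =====

-- B replaces A's single accumulating pass by a two-pass decomposition: first collect the
-- split boundaries, then partition the list by slicing between consecutive boundaries.

-- ===== PORT A =====
-- single pass over positions 1..n-1 carrying (groups, current_group, previous element)
def group_consecutive_peaks_py (peak_indices : List Int) (max_gap : Int) : List (List Int) :=
  match peak_indices with
  | [] => []
  | p0 :: rest =>
    let st := rest.foldl (fun (s : List (List Int) × List Int × Int) x =>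
      if x - s.2.2 ≤ max_gap then (s.1, s.2.1 ++ [x], x)
      else (s.1 ++ [s.2.1], [x], x)) ([], [p0], p0)
    st.1 ++ [st.2.1]

-- ===== PORT B =====
-- pass 1: boundary indices (0, every i whose gap exceeds max_gap, n);
-- pass 2: slice between consecutive boundaries (indices are in range, so getD/drop-take are exact)
def group_consecutive_peaks_py_alt (peak_indices : List Int) (max_gap : Int) : List (List Int) :=
  match peak_indices with
  | [] => []
  | _ :: _ =>
    let bounds : List Nat :=
      0 :: ((List.range' 1 (peak_indices.length - 1)).filter
        (fun i => decide (peak_indices.getD i 0 - peak_indices.getD (i - 1) 0 > max_gap))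
        ++ [peak_indices.length])
    (bounds.zip bounds.tail).map (fun se => (peak_indices.drop se.1).take (se.2 - se.1))

-- ===== PRECONDITION & SPEC =====
def Spec_group_consecutive_peaks_py (peak_indices : List Int) (max_gap : Int) (out : List (List Int)) : Prop := out = group_consecutive_peaks_py_alt peak_indices max_gap
instance (peak_indices : List Int) (max_gap : Int) (out : List (List Int)) : Decidable (Spec_group_consecutive_peaks_py peak_indices max_gap out) := by unfold Spec_group_consecutive_peaks_py; infer_instance

-- ===== CLAIM (what is proved, stated in full; the proofs are below) =====
def Claim_equal_group_consecutive_peaks_py : Prop := ∀ (peak_indices : List Int) (max_gap : Int), Dom_group_consecutive_peaks_py peak_indices max_gap → Spec_group_consecutive_peaks_py peak_indices max_gap (group_consecutive_peaks_py peak_indices max_gap)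

-- ===== LEMMAS AND PROOFS =====

-- common characterisation of the grouping, as a structural recursion over the tail
def pvChunks (g : Int) : Int → List Int → List Int → List (List Int)
  | _, cur, [] => [cur]
  | prev, cur, x :: xs =>
    if x - prev ≤ g then pvChunks g x (cur ++ [x]) xs else cur :: pvChunks g x [x] xs

-- B's two passes, abstracted
def pvBounds (g : Int) (l : List Int) : List Nat :=
  0 :: ((List.range' 1 (l.length - 1)).filter
    (fun i => decide (l.getD i 0 - l.getD (i - 1) 0 > g)) ++ [l.length])

def pvSlices (l : List Int) (bs : List Nat) : List (List Int) :=
  (bs.zip bs.tail).map (fun se => (l.drop se.1).take (se.2 - se.1))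

theorem pvChunks_ne_nil (g prev : Int) (cur : List Int) (xs : List Int) :
    pvChunks g prev cur xs ≠ [] := by
  induction xs generalizing prev cur with
  | nil => simp [pvChunks]
  | cons x xs ih =>
    simp only [pvChunks]
    split_ifs
    · exact ih _ _
    · simp

theorem pvChunks_cons_head (g : Int) (xs : List Int) (prev p : Int) (cur h : List Int)
    (t : List (List Int)) (hE : pvChunks g prev cur xs = h :: t) :
    pvChunks g prev (p :: cur) xs = (p :: h) :: t := by
  induction xs generalizing prev cur h t with
  | nil =>
    simp only [pvChunks] at hE
    injection hE with h1 h2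
    subst h1; subst h2
    rfl
  | cons x xs ih =>
    simp only [pvChunks] at hE ⊢
    split_ifs at hE ⊢ with hc
    · exact ih _ _ _ _ hE
    · cases hE; rfl

-- A's fold equals pvChunks
theorem pvFoldA (g : Int) (xs : List Int) (groups : List (List Int)) (cur : List Int) (prev : Int) :
    (xs.foldl (fun (s : List (List Int) × List Int × Int) x =>
      if x - s.2.2 ≤ g then (s.1, s.2.1 ++ [x], x)
      else (s.1 ++ [s.2.1], [x], x)) (groups, cur, prev)).1
    ++ [(xs.foldl (fun (s : List (List Int) × List Int × Int) x =>
      if x - s.2.2 ≤ g then (s.1, s.2.1 ++ [x], x)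
      else (s.1 ++ [s.2.1], [x], x)) (groups, cur, prev)).2.1]
    = groups ++ pvChunks g prev cur xs := by
  induction xs generalizing groups cur prev with
  | nil => simp [pvChunks]
  | cons x xs ih =>
    simp only [List.foldl, pvChunks]
    split_ifs with hc
    · exact ih _ _ _
    · rw [ih]; simp

theorem pvSlices_cons_cons (l : List Int) (a b : Nat) (t : List Nat) :
    pvSlices l (a :: b :: t) = (l.drop a).take (b - a) :: pvSlices l (b :: t) := rfl

-- shifting every boundary by one while consing an element keeps the slices
theorem pvSlices_shift (p : Int) (l : List Int) : ∀ bs : List Nat,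
    pvSlices (p :: l) (bs.map (1 + ·)) = pvSlices l bs
  | [] => rfl
  | [_] => rfl
  | a :: b :: t => by
    have h1 : 1 + a = a + 1 := Nat.add_comm 1 a
    have h2 : 1 + b - (1 + a) = b - a := by omega
    rw [List.map_cons, List.map_cons, pvSlices_cons_cons, ← List.map_cons,
      pvSlices_shift p l (b :: t), pvSlices_cons_cons, h2, h1, List.drop_succ_cons]

-- the boundary list of p :: m in terms of the boundary list of m
theorem pvBounds_cons (g p x : Int) (xs : List Int) :
    pvBounds g (p :: x :: xs) =
      0 :: (if x - p > g
        then 1 :: ((pvBounds g (x :: xs)).tail.map (1 + ·))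
        else (pvBounds g (x :: xs)).tail.map (1 + ·)) := by
  simp only [pvBounds, List.length_cons, List.tail_cons, Nat.add_sub_cancel]
  have hr : List.range' 1 (xs.length + 1) = 1 :: (List.range' 1 xs.length).map (1 + ·) := by
    rw [List.range'_succ, List.map_add_range']
  rw [hr, List.filter_cons]
  have hpred1 : (decide ((p :: x :: xs).getD 1 0 - (p :: x :: xs).getD (1 - 1) 0 > g))
      = decide (x - p > g) := by simp
  have hfm : ((List.range' 1 xs.length).map (1 + ·)).filter
        (fun i => decide ((p :: x :: xs).getD i 0 - (p :: x :: xs).getD (i - 1) 0 > g))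
      = ((List.range' 1 xs.length).filter
        (fun i => decide ((x :: xs).getD i 0 - (x :: xs).getD (i - 1) 0 > g))).map (1 + ·) := by
    rw [List.filter_map]
    congr 1
    apply List.filter_congr
    intro i hi
    have h1 : 1 ≤ i := (List.mem_range'_1.mp hi).1
    obtain ⟨j, rfl⟩ : ∃ j, i = j + 1 := ⟨i - 1, by omega⟩
    simp only [Function.comp]
    have e1 : 1 + (j + 1) = (j + 1) + 1 := by omega
    simp only [e1, List.getD_cons_succ, Nat.add_sub_cancel]
  rw [hpred1, hfm]
  simp only [decide_eq_true_eq]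
  have hlen : xs.length + 1 + 1 = 1 + (xs.length + 1) := by omega
  split_ifs with hg
  · simp [hlen, List.map_append]
  · simp [hlen, List.map_append]

-- B's two passes equal pvChunks
theorem pvB_eq_chunks (g : Int) : ∀ (xs : List Int) (p : Int),
    pvSlices (p :: xs) (pvBounds g (p :: xs)) = pvChunks g p [p] xs
  | [], _ => rfl
  | x :: xs, p => by
    rw [pvBounds_cons]
    have hcs : ∃ c cs', (pvBounds g (x :: xs)).tail = c :: cs' := by
      simp only [pvBounds, List.tail_cons]
      rcases hE : ((List.range' 1 ((x :: xs).length - 1)).filter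
          (fun i => decide ((x :: xs).getD i 0 - (x :: xs).getD (i - 1) 0 > g))) with _ | ⟨c, cs⟩
      · exact ⟨_, _, rfl⟩
      · exact ⟨_, _, rfl⟩
    obtain ⟨c, cs', hc⟩ := hcs
    have hB : pvBounds g (x :: xs) = 0 :: c :: cs' := by
      rw [← hc]; simp [pvBounds]
    have ih := pvB_eq_chunks g xs x
    by_cases hg : x - p > g
    · -- gap: a new group starts at x
      rw [if_pos hg, hc, pvSlices_cons_cons]
      have hmap : (1 : Nat) :: (c :: cs').map (1 + ·) = ((0 : Nat) :: c :: cs').map (1 + ·) := rfl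
      rw [hmap, pvSlices_shift, ← hB, ih]
      simp only [pvChunks, if_neg (by omega : ¬ x - p ≤ g)]
      simp
    · -- no gap: x joins p's group, i.e. p is consed onto the head group
      rw [if_neg hg, hc]
      rcases hE : pvChunks g x [x] xs with _ | ⟨h, t⟩
      · exact absurd hE (pvChunks_ne_nil g x [x] xs)
      have hRH : pvChunks g p [p] (x :: xs) = (p :: h) :: t := by
        simp only [pvChunks, if_pos (by omega : x - p ≤ g)]
        exact pvChunks_cons_head g xs x p [x] h t hE
      have hIH : pvSlices (x :: xs) (0 :: c :: cs') = h :: t := by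
        rw [← hB, ih, hE]
      rw [pvSlices_cons_cons] at hIH
      rw [hRH]
      rw [List.map_cons, pvSlices_cons_cons, ← List.map_cons, pvSlices_shift]
      injection hIH with hh ht
      rw [ht]
      have e1 : 1 + c - 0 = c + 1 := by omega
      rw [e1, List.drop_zero, List.take_succ_cons]
      rw [List.drop_zero, Nat.sub_zero] at hh
      rw [hh]

-- ===== VERDICT (by name: the statement is the Claim_ definition above) =====
theorem group_consecutive_peaks_py_spec : Claim_equal_group_consecutive_peaks_py := by
  intro l g _
  unfold Spec_group_consecutive_peaks_py
  cases l with
  | nil => rfl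
  | cons p xs =>
    have hB : group_consecutive_peaks_py_alt (p :: xs) g
        = pvSlices (p :: xs) (pvBounds g (p :: xs)) := rfl
    rw [hB, pvB_eq_chunks]
    simpa [group_consecutive_peaks_py] using pvFoldA g xs [] [p] p
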